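-- pv_equiv track=rewrite | github.com/Yug6584/BlueCarbon | frontend/src/components/Chatbot/carbon-chatbot/services/simple_chat_engine.py | _get_formatting_instructions
-- ===== SOURCE A (Python) =====
-- def _get_formatting_instructions(query_lower: str) -> str:
--     """Get formatting instructions based on query type"""
--     if any(word in query_lower for word in ['compare', 'vs', 'versus', 'difference']):
--         return "Create comparison tables when showing differences"
--     elif any(word in query_lower for word in ['list', 'types', 'examples', 'benefits']):
--         return "Use bullet points with emojis for lists"
--     elif any(word in query_lower for word in ['steps', 'how to', 'process', 'method']):
--         return "Use numbered steps with relevant emojis"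
--     elif any(word in query_lower for word in ['data', 'statistics', 'numbers']):
--         return "**Bold** all important numbers and data with 📊"
--     else:
--         return "Use engaging formatting with strategic emojis and **bold** emphasis"
-- ===== SOURCE B (Python) =====
-- # B: flat keyword -> rule-index map; one pass computing the MINIMUM matching
-- # rule index over all keywords, then index into a message table (index 4 = default).
-- _KEYWORD_RULE = {
--     'compare': 0, 'vs': 0, 'versus': 0, 'difference': 0,
--     'list': 1, 'types': 1, 'examples': 1, 'benefits': 1,
--     'steps': 2, 'how to': 2, 'process': 2, 'method': 2,
--     'data': 3, 'statistics': 3, 'numbers': 3,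
-- }
--
-- _MESSAGES = [
--     "Create comparison tables when showing differences",
--     "Use bullet points with emojis for lists",
--     "Use numbered steps with relevant emojis",
--     "**Bold** all important numbers and data with \U0001F4CA",
--     "Use engaging formatting with strategic emojis and **bold** emphasis",
-- ]
--
--
-- def _get_formatting_instructions(query_lower: str) -> str:
--     """Get formatting instructions based on query type"""
--     best = len(_MESSAGES) - 1
--     for word, idx in _KEYWORD_RULE.items():
--         if idx < best and word in query_lower:
--             best = idx
--     return _MESSAGES[best]
-- ===== Notes on version B (the rewrite author's own statement) =====
-- stated objective: alternative
-- what changed: Replaced the per-group if-elif cascade of any() scans with a flat keyword-to-rule-index map folded in one pass to the minimum matching rule index, which then selects the message from a table; correctness: first matching group equals smallest matching group index.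
import Mathlib
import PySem

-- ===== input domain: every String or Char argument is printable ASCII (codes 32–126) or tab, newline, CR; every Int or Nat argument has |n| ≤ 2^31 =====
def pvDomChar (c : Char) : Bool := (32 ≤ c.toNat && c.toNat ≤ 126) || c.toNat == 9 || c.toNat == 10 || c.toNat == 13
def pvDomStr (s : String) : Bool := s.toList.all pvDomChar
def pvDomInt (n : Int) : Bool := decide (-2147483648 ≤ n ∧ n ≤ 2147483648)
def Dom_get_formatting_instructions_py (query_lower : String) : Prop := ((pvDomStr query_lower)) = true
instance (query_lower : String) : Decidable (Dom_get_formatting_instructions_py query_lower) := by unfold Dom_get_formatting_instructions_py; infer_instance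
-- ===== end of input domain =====

-- ===== PORT A =====
-- B replaces A's if-elif cascade of per-group any() scans by a one-pass minimum matching rule index over a flat keyword->rule-index map plus a message table (alternative decomposition, same cost).
def get_formatting_instructions_py (query_lower : String) : String :=
  if ["compare", "vs", "versus", "difference"].any (fun word => PySem.Str.isIn word query_lower) then
    "Create comparison tables when showing differences"
  else if ["list", "types", "examples", "benefits"].any (fun word => PySem.Str.isIn word query_lower) then
    "Use bullet points with emojis for lists"
  else if ["steps", "how to", "process", "method"].any (fun word => PySem.Str.isIn word query_lower) then
    "Use numbered steps with relevant emojis"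
  else if ["data", "statistics", "numbers"].any (fun word => PySem.Str.isIn word query_lower) then
    "**Bold** all important numbers and data with 📊"
  else
    "Use engaging formatting with strategic emojis and **bold** emphasis"

-- ===== PORT B =====
def pvKeywordRule : List (String × Nat) :=
  [ ("compare", 0), ("vs", 0), ("versus", 0), ("difference", 0),
    ("list", 1), ("types", 1), ("examples", 1), ("benefits", 1),
    ("steps", 2), ("how to", 2), ("process", 2), ("method", 2),
    ("data", 3), ("statistics", 3), ("numbers", 3) ]

def pvMessages : List String :=
  [ "Create comparison tables when showing differences",
    "Use bullet points with emojis for lists",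
    "Use numbered steps with relevant emojis",
    "**Bold** all important numbers and data with 📊",
    "Use engaging formatting with strategic emojis and **bold** emphasis" ]

-- the loop body: 'if idx < best and word in query_lower: best = idx'
def pvStep (query_lower : String) (best : Nat) (p : String × Nat) : Nat :=
  if p.2 < best ∧ PySem.Str.isIn p.1 query_lower then p.2 else best

def get_formatting_instructions_py_alt (query_lower : String) : String :=
  let best := pvKeywordRule.foldl (pvStep query_lower) (pvMessages.length - 1)
  pvMessages.getD best ""

-- ===== PRECONDITION & SPEC =====
def Spec_get_formatting_instructions_py (query_lower : String) (out : String) : Prop := out = get_formatting_instructions_py_alt query_lower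
instance (query_lower : String) (out : String) : Decidable (Spec_get_formatting_instructions_py query_lower out) := by unfold Spec_get_formatting_instructions_py; infer_instance

-- ===== CLAIM =====
def Claim_equal_get_formatting_instructions_py : Prop := ∀ (query_lower : String), Dom_get_formatting_instructions_py query_lower → Spec_get_formatting_instructions_py query_lower (get_formatting_instructions_py query_lower)

-- ===== LEMMAS AND PROOFS =====

-- if every remaining index is ≥ best, the fold leaves best unchanged
theorem pvFold_stop (q : String) (l : List (String × Nat)) (best : Nat)
    (h : ∀ p ∈ l, best ≤ p.2) :
    l.foldl (pvStep q) best = best := by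
  induction l with
  | nil => rfl
  | cons p rest ih =>
      have hb : best ≤ p.2 := h p (by simp)
      simp only [List.foldl, pvStep]
      rw [if_neg (by rintro ⟨hlt, -⟩; omega)]
      exact ih (fun p hp => h p (by simp [hp]))

-- folding one group of keywords (all with the same index i < best):
-- best drops to i iff some keyword of the group matches
theorem pvFold_group (q : String) (ks : List String) (i : Nat) (rest : List (String × Nat))
    (best : Nat) (h : i < best) :
    ((ks.map (fun w => (w, i))) ++ rest).foldl (pvStep q) best =
      if ks.any (fun w => PySem.Str.isIn w q) then rest.foldl (pvStep q) i
      else rest.foldl (pvStep q) best := by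
  induction ks generalizing best with
  | nil => simp
  | cons w ks ih =>
      by_cases hw : PySem.Str.isIn w q = true
      · have hstep : pvStep q best (w, i) = i := by
          simp only [pvStep]; exact if_pos ⟨h, hw⟩
        simp only [List.map, List.cons_append, List.foldl, hstep, hw, List.any_cons,
          Bool.true_or, if_true]
        rw [List.foldl_append, pvFold_stop q (ks.map (fun w => (w, i))) i
          (by intro p hp; simp only [List.mem_map] at hp; obtain ⟨w', _, rfl⟩ := hp; exact le_refl i)]
      · have hstep : pvStep q best (w, i) = best := by
          simp only [pvStep]; exact if_neg (by rintro ⟨-, hin⟩; exact hw hin)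
        simp only [List.map, List.cons_append, List.foldl, hstep, List.any_cons,
          Bool.eq_false_iff.mpr hw, Bool.false_or]
        exact ih best h

-- ===== VERDICT =====
theorem get_formatting_instructions_py_spec : Claim_equal_get_formatting_instructions_py := by
  intro q _
  unfold Spec_get_formatting_instructions_py get_formatting_instructions_py get_formatting_instructions_py_alt
  have hsplit : pvKeywordRule =
      (["compare", "vs", "versus", "difference"].map (fun w => (w, 0))) ++
      ((["list", "types", "examples", "benefits"].map (fun w => (w, 1))) ++
      ((["steps", "how to", "process", "method"].map (fun w => (w, 2))) ++
      ((["data", "statistics", "numbers"].map (fun w => (w, 3))) ++ []))) := rfl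
  rw [hsplit]
  show _ = pvMessages.getD (List.foldl (pvStep q) 4 _) ""
  rw [pvFold_group q _ 0 _ 4 (by norm_num)]
  by_cases h0 : ["compare", "vs", "versus", "difference"].any (fun w => PySem.Str.isIn w q) = true
  · simp only [h0, if_true]
    rw [pvFold_stop q _ 0 (by intro p hp; exact Nat.zero_le _)]
    simp [pvMessages]
  · simp only [Bool.eq_false_iff.mpr h0]
    rw [pvFold_group q _ 1 _ 4 (by norm_num)]
    by_cases h1 : ["list", "types", "examples", "benefits"].any (fun w => PySem.Str.isIn w q) = true
    · simp only [h1, if_true]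
      rw [pvFold_stop q _ 1 (by decide)]
      simp [pvMessages]
    · simp only [Bool.eq_false_iff.mpr h1]
      rw [pvFold_group q _ 2 _ 4 (by norm_num)]
      by_cases h2 : ["steps", "how to", "process", "method"].any (fun w => PySem.Str.isIn w q) = true
      · simp only [h2, if_true]
        rw [pvFold_stop q _ 2 (by decide)]
        simp [pvMessages]
      · simp only [Bool.eq_false_iff.mpr h2]
        rw [pvFold_group q _ 3 _ 4 (by norm_num)]
        by_cases h3 : ["data", "statistics", "numbers"].any (fun w => PySem.Str.isIn w q) = true
        · simp only [h3, if_true, List.foldl_nil]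
          simp [pvMessages]
        · simp only [Bool.eq_false_iff.mpr h3, List.foldl_nil]
          simp [pvMessages]
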